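-- pv_equiv track=rewrite | github.com/mukerem/WebScrapping | codeforces/archive/Shower_Line_431B.py | initial_order_for_maximum_happiness
-- ===== SOURCE A (Python) =====
-- from itertools import permutations
-- from typing import List
--
-- def initial_order_for_maximum_happiness(mat: List[List[int]]) -> int:
--     def calculate_happiness(student: List[int]) -> int:
--         hap = 0
--         n  = 5
--         while student:
--             pair = [(student[i], student[i+1]) for i in range(0, n-1, 2)]
--             for i, j in pair:
--                 hap += mat[i][j]
--                 hap += mat[j][i]
--             n -= 1
--             student = student[1:]
--         return hap
--     num = [0, 1, 2, 3, 4]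
--     possible = list(permutations(num))
--     happiness = 0
--     for order in possible:
--         hap = calculate_happiness(order)
--         happiness = max(happiness, hap)
--     return happiness
-- ===== SOURCE B (Python) =====
-- from itertools import permutations
-- from typing import List
--
--
-- def initial_order_for_maximum_happiness(mat: List[List[int]]) -> int:
--     # The pairing schedule of A's shrinking while-loop weights the adjacent
--     # pairs of the order as 1,1,2,2; compute that closed-form weighted sum.
--     edges = [(0, 1, 1), (1, 2, 1), (2, 3, 2), (3, 4, 2)]
--     best = 0
--     for order in permutations(range(5)):
--         h = sum(w * (mat[order[a]][order[b]] + mat[order[b]][order[a]])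
--                 for a, b, w in edges)
--         best = max(best, h)
--     return best
-- ===== Notes on version B (the rewrite author's own statement) =====
-- stated objective: simpler
-- what changed: The inner while-loop that repeatedly slices the order and re-pairs a shrinking list is replaced by a fixed closed-form weighted sum over four adjacency edges with weights 1,1,2,2; the outer max over the 120 permutations is kept.
import Mathlib
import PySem

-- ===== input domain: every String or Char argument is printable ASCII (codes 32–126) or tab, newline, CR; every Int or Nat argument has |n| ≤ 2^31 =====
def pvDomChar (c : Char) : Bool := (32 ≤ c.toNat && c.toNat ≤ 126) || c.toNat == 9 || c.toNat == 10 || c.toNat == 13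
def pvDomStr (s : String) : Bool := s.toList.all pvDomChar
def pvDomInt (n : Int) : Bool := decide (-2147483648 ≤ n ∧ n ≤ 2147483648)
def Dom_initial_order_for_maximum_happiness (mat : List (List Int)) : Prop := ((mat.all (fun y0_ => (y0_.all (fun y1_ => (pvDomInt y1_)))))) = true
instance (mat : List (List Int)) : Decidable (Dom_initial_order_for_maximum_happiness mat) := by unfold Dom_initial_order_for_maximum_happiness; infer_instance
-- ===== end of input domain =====

-- B replaces A's shrinking while-loop by a closed-form weighted sum over four fixed edges (objective: simpler).

-- ===== PORT A =====
-- mat[i][j] as a total lookup; exact under Pre_ (all indices used are 0..4 and in range there).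
def pvLookupA (mat : List (List Int)) (i j : Nat) : Int := (mat.getD i []).getD j 0

-- the while-loop of calculate_happiness: state (student, n, hap); student = student[1:] each round
def pvCalcHap (mat : List (List Int)) : List Nat → Int → Int → Int
  | [], _, hap => hap
  | x :: rest, n, hap =>
      let student := x :: rest
      let pair := (PySem.List.pyRange 0 (n - 1) 2).map
        (fun i => (student.getD i.toNat 0, student.getD (i.toNat + 1) 0))
      pvCalcHap mat rest (n - 1)
        (pair.foldl (fun h p => h + pvLookupA mat p.1 p.2 + pvLookupA mat p.2 p.1) hap)

def initial_order_for_maximum_happiness (mat : List (List Int)) : Int :=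
  let possible := PySem.List.permutations [0, 1, 2, 3, 4] 5
  possible.foldl (fun happiness order => max happiness (pvCalcHap mat order 5 0)) 0

-- ===== PORT B =====
def pvEdges : List (Nat × Nat × Int) := [(0, 1, 1), (1, 2, 1), (2, 3, 2), (3, 4, 2)]

def pvHapAlt (mat : List (List Int)) (order : List Nat) : Int :=
  (pvEdges.map (fun e =>
    e.2.2 * ((mat.getD (order.getD e.1 0) []).getD (order.getD e.2.1 0) 0
           + (mat.getD (order.getD e.2.1 0) []).getD (order.getD e.1 0) 0))).sum

def initial_order_for_maximum_happiness_alt (mat : List (List Int)) : Int :=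
  (PySem.List.permutations [0, 1, 2, 3, 4] 5).foldl
    (fun best order => max best (pvHapAlt mat order)) 0

-- ===== PRECONDITION & SPEC =====
-- Pre_ excludes exactly the inputs where A raises IndexError: mat must have at least 5 rows,
-- each of the first 5 rows with at least 5 entries (A reads mat[i][j] for all i,j in 0..4).
def Pre_initial_order_for_maximum_happiness (mat : List (List Int)) : Prop :=
  5 ≤ mat.length ∧ ∀ r ∈ mat.take 5, 5 ≤ r.length
instance (mat : List (List Int)) : Decidable (Pre_initial_order_for_maximum_happiness mat) := by
  unfold Pre_initial_order_for_maximum_happiness; infer_instance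

def pvWitness_initial_order_for_maximum_happiness : List (List Int) :=
  [[0, 0, 0, 0, 0], [0, 0, 0, 0, 0], [0, 0, 0, 0, 0], [0, 0, 0, 0, 0], [0, 0, 0, 0, 0]]

def Spec_initial_order_for_maximum_happiness (mat : List (List Int)) (out : Int) : Prop := out = initial_order_for_maximum_happiness_alt mat
instance (mat : List (List Int)) (out : Int) : Decidable (Spec_initial_order_for_maximum_happiness mat out) := by unfold Spec_initial_order_for_maximum_happiness; infer_instance

-- ===== CLAIM (what is proved, stated in full; the proofs are below) =====
def Claim_equal_initial_order_for_maximum_happiness : Prop := ∀ (mat : List (List Int)), Dom_initial_order_for_maximum_happiness mat → Pre_initial_order_for_maximum_happiness mat → Spec_initial_order_for_maximum_happiness mat (initial_order_for_maximum_happiness mat)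

-- ===== LEMMAS AND PROOFS =====

-- per-permutation agreement: A's shrinking-loop happiness equals B's weighted edge sum
theorem pvCalc_eq_alt (mat : List (List Int)) (a b c d e : Nat) :
    pvCalcHap mat [a, b, c, d, e] 5 0 = pvHapAlt mat [a, b, c, d, e] := by
  simp [pvCalcHap, pvHapAlt, pvLookupA, pvEdges, PySem.List.pyRange, List.range_succ]
  ring

theorem pvPerm_len5 {o : List Nat}
    (ho : o ∈ PySem.List.permutations [0, 1, 2, 3, 4] 5) :
    ∃ a b c d e, o = [a, b, c, d, e] := by
  have h : o.length = 5 := by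
    have := PySem.List.perm_of_mem_permutations (xs := [0, 1, 2, 3, 4]) (by simpa using ho)
    simpa using this.length_eq
  match o, h with
  | [a, b, c, d, e], _ => exact ⟨a, b, c, d, e, rfl⟩

-- ===== VERDICT (by name: the statement is the Claim_ definition above) =====
theorem initial_order_for_maximum_happiness_spec : Claim_equal_initial_order_for_maximum_happiness := by
  intro mat _ _
  unfold Spec_initial_order_for_maximum_happiness
  unfold initial_order_for_maximum_happiness initial_order_for_maximum_happiness_alt
  refine PySem.List.foldl_congr_mem _ _ _ _ ?_
  intro acc o ho
  obtain ⟨a, b, c, d, e, rfl⟩ := pvPerm_len5 ho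
  rw [pvCalc_eq_alt]
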